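-- pv_equiv track=rewrite | github.com/AANovokhatskiy/pyscarcopula | pyscarcopula/vine/_conditional_exact.py | posterior_indices
-- ===== SOURCE A (Python) =====
-- def posterior_indices(order_vars, given):
--     """Indices whose latent w must account for future fixed variables."""
--     given_positions = [idx for idx, var in enumerate(order_vars) if var in given]
--     if not given_positions:
--         return []
--     last_given = max(given_positions)
--     return [
--         idx for idx in range(last_given + 1)
--         if order_vars[idx] not in given
--     ]
-- ===== SOURCE B (Python) =====
-- def posterior_indices(order_vars, given):
--     """Indices whose latent w must account for future fixed variables."""
--     result = []
--     pending = []
--     for idx, var in enumerate(order_vars):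
--         if var in given:
--             result.extend(pending)
--             pending = []
--         else:
--             pending.append(idx)
--     return result
-- ===== Notes on version B (the rewrite author's own statement) =====
-- stated objective: alternative
-- what changed: Replaced the compute-given-positions/max/range-filter pipeline (which rescans order_vars and given) by a single forward pass that buffers not-given indices and commits the buffer each time a given variable is seen, discarding the trailing buffer.
import Mathlib
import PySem

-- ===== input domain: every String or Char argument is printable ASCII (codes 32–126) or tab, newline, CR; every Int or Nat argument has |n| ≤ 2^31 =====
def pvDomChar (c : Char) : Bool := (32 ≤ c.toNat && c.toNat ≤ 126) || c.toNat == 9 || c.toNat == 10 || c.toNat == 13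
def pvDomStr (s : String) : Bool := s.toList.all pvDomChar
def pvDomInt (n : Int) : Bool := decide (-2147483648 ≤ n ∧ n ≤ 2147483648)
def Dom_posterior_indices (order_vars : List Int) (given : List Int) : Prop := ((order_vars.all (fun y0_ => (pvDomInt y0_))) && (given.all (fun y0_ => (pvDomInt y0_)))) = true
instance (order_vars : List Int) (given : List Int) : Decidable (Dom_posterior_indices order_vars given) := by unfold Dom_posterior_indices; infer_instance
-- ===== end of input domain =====

-- B replaces the positions/max/range-filter pipeline by a single buffered forward pass; objective: alternative decomposition, same cost.


-- ===== PORT A =====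
-- literal port of A: build the list of positions of variables that are in `given`,
-- return [] if empty, else take max and filter range(last_given+1) by "not in given".
-- order_vars[idx] is ported with pyGetD (idx is always in range: idx ≤ last_given,
-- which is a valid index by construction).
def posterior_indices (order_vars : List Int) (given : List Int) : List Int :=
  let given_positions : List Int :=
    ((PySem.List.enumerate order_vars 0).filter (fun p => decide (p.2 ∈ given))).map (fun p => p.1)
  if given_positions = [] then []
  else
    match PySem.List.max? given_positions (fun y => y) with
    | none => []  -- unreachable: given_positions ≠ []
    | some last_given =>
      (PySem.List.pyRange 0 (last_given + 1) 1).filter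
        (fun idx => !decide (PySem.List.pyGetD order_vars idx 0 ∈ given))

-- ===== PORT B =====
-- the loop of Source B: state (result, pending); commit pending on a given var, else buffer the index.
def piLoop (given : List Int) : List (Int × Int) → List Int → List Int → List Int
  | [], result, _pending => result
  | (idx, var) :: rest, result, pending =>
    if var ∈ given then piLoop given rest (result ++ pending) []
    else piLoop given rest result (pending ++ [idx])

def posterior_indices_alt (order_vars : List Int) (given : List Int) : List Int :=
  piLoop given (PySem.List.enumerate order_vars 0) [] []

-- ===== PRECONDITION & SPEC =====
def Spec_posterior_indices (order_vars : List Int) (given : List Int) (out : List Int) : Prop := out = posterior_indices_alt order_vars given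
instance (order_vars : List Int) (given : List Int) (out : List Int) : Decidable (Spec_posterior_indices order_vars given out) := by unfold Spec_posterior_indices; infer_instance

-- ===== CLAIM (what is proved, stated in full; the proofs are below) =====
def Claim_equal_posterior_indices : Prop := ∀ (order_vars : List Int) (given : List Int), Dom_posterior_indices order_vars given → Spec_posterior_indices order_vars given (posterior_indices order_vars given)

-- ===== LEMMAS AND PROOFS =====

-- reference recursion: the value computed by B's loop (proved below), indices offset by s
def piRef (given : List Int) : List Int → Int → List Int
  | [], _ => []
  | x :: xs, s =>
    if x ∈ given then piRef given xs (s + 1)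
    else if xs.any (fun v => decide (v ∈ given)) then s :: piRef given xs (s + 1)
    else []

lemma piRef_of_not_any (given l : List Int) (s : Int)
    (h : l.any (fun v => decide (v ∈ given)) = false) : piRef given l s = [] := by
  induction l generalizing s with
  | nil => rfl
  | cons x xs ih =>
    rw [List.any_cons, Bool.or_eq_false_iff] at h
    have hx : x ∉ given := by simpa using h.1
    simp [piRef, hx, h.2]

lemma piLoop_eq (given l : List Int) (s : Int) (result pending : List Int) :
    piLoop given (PySem.List.enumerate l s) result pending =
      result ++ (if l.any (fun v => decide (v ∈ given)) then pending else []) ++ piRef given l s := by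
  induction l generalizing s result pending with
  | nil => simp [PySem.List.enumerate, piLoop, piRef]
  | cons x xs ih =>
    rw [PySem.List.enumerate_cons]
    by_cases hx : x ∈ given
    · simp only [piLoop, ih, piRef, List.any_cons, hx]
      simp
    · simp only [piLoop, ih, piRef, List.any_cons, hx]
      by_cases ha : xs.any (fun v => decide (v ∈ given))
      · simp [ha]
      · simp [ha, piRef_of_not_any given xs (s+1) (by simpa using ha)]

lemma alt_eq_piRef (order_vars given : List Int) :
    posterior_indices_alt order_vars given = piRef given order_vars 0 := by
  rw [posterior_indices_alt, piLoop_eq]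
  split <;> simp

lemma any_iff (given l : List Int) :
    l.any (fun v => decide (v ∈ given)) = true ↔ ∃ m : Nat, m < l.length ∧ l.getD m 0 ∈ given := by
  rw [List.any_eq_true]
  constructor
  · rintro ⟨v, hv, hg⟩
    rcases List.mem_iff_getElem.1 hv with ⟨m, hm, rfl⟩
    exact ⟨m, hm, by simp [List.getD_eq_getElem?_getD, hm]; simpa using hg⟩
  · rintro ⟨m, hm, hg⟩
    refine ⟨l.getD m 0, ?_, by simpa using hg⟩
    rw [List.getD_eq_getElem?_getD, List.getElem?_eq_getElem hm]
    simp [List.getElem_mem]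

lemma mem_piRef (given l : List Int) (s j : Int) :
    j ∈ piRef given l s ↔
      ∃ k : Nat, k < l.length ∧ j = s + k ∧ l.getD k 0 ∉ given ∧
        ∃ m : Nat, k < m ∧ m < l.length ∧ l.getD m 0 ∈ given := by
  induction l generalizing s with
  | nil => simp [piRef]
  | cons x xs ih =>
    simp only [piRef]
    by_cases hx : x ∈ given
    · rw [if_pos hx, ih]
      constructor
      · rintro ⟨k, hk, rfl, hng, m, hkm, hm, hg⟩
        exact ⟨k + 1, by simpa using hk, by push_cast; ring, by simpa using hng,
          m + 1, by omega, by simpa using hm, by simpa using hg⟩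
      · rintro ⟨k, hk, rfl, hng, m, hkm, hm, hg⟩
        match k with
        | 0 => simp at hng; exact absurd hx hng
        | Nat.succ k =>
          match m with
          | Nat.succ m =>
            exact ⟨k, by simpa using hk, by push_cast; ring, by simpa using hng,
              m, by omega, by simpa using hm, by simpa using hg⟩
    · rw [if_neg hx]
      by_cases ha : xs.any (fun v => decide (v ∈ given)) = true
      · rw [if_pos ha]
        rcases (any_iff given xs).1 ha with ⟨m0, hm0, hg0⟩
        constructor
        · intro hj
          rcases List.mem_cons.1 hj with rfl | hj
          · exact ⟨0, by simp, by simp, by simpa using hx,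
              m0 + 1, by omega, by simpa using hm0, by simpa using hg0⟩
          · rcases (ih (s + 1)).1 hj with ⟨k, hk, rfl, hng, m, hkm, hm, hg⟩
            exact ⟨k + 1, by simpa using hk, by push_cast; ring, by simpa using hng,
              m + 1, by omega, by simpa using hm, by simpa using hg⟩
        · rintro ⟨k, hk, rfl, hng, m, hkm, hm, hg⟩
          match k with
          | 0 => simp
          | Nat.succ k =>
            refine List.mem_cons.2 (Or.inr ((ih (s + 1)).2 ?_))
            match m with
            | Nat.succ m =>
              exact ⟨k, by simpa using hk, by push_cast; ring, by simpa using hng,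
                m, by omega, by simpa using hm, by simpa using hg⟩
      · rw [if_neg ha]
        simp only [List.not_mem_nil, false_iff]
        rintro ⟨k, hk, rfl, hng, m, hkm, hm, hg⟩
        match m with
        | 0 => omega
        | Nat.succ m =>
          exact ha ((any_iff given xs).2 ⟨m, by simpa using hm, by simpa using hg⟩)

lemma piRef_lower (given l : List Int) (s : Int) : ∀ j ∈ piRef given l s, s ≤ j := by
  intro j hj
  rcases (mem_piRef given l s j).1 hj with ⟨k, _, rfl, _⟩
  omega

lemma piRef_pairwise (given l : List Int) (s : Int) : (piRef given l s).Pairwise (· < ·) := by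
  induction l generalizing s with
  | nil => simp [piRef]
  | cons x xs ih =>
    simp only [piRef]
    split
    · exact ih _
    · split
      · refine List.pairwise_cons.2 ⟨fun j hj => ?_, ih _⟩
        have := piRef_lower given xs (s + 1) j hj; omega
      · simp

lemma mem_enumerate (l : List Int) (s : Int) (i v : Int) :
    (i, v) ∈ PySem.List.enumerate l s ↔
      ∃ k : Nat, k < l.length ∧ i = s + k ∧ v = l.getD k 0 := by
  induction l generalizing s with
  | nil => simp [PySem.List.enumerate]
  | cons x xs ih =>
    rw [PySem.List.enumerate_cons]
    simp only [List.mem_cons, Prod.mk.injEq, ih]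
    constructor
    · rintro (⟨rfl, rfl⟩ | ⟨k, hk, rfl, rfl⟩)
      · exact ⟨0, by simp, by simp, by simp⟩
      · exact ⟨k + 1, by simpa using hk, by push_cast; ring, by simp⟩
    · rintro ⟨k, hk, rfl, rfl⟩
      match k with
      | 0 => left; simp
      | Nat.succ k => right; exact ⟨k, by simpa using hk, by push_cast; ring, by simp⟩

-- membership in A's given_positions
lemma mem_given_positions (order_vars given : List Int) (p : Int) :
    p ∈ ((PySem.List.enumerate order_vars 0).filter (fun q => decide (q.2 ∈ given))).map (fun q => q.1) ↔
      ∃ k : Nat, k < order_vars.length ∧ p = (k : Int) ∧ order_vars.getD k 0 ∈ given := by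
  simp only [List.mem_map, List.mem_filter]
  constructor
  · rintro ⟨⟨i, v⟩, ⟨hmem, hg⟩, rfl⟩
    rcases (mem_enumerate order_vars 0 i v).1 hmem with ⟨k, hk, rfl, rfl⟩
    exact ⟨k, hk, by simp, by simpa using hg⟩
  · rintro ⟨k, hk, rfl, hg⟩
    exact ⟨((k : Int), order_vars.getD k 0),
      ⟨(mem_enumerate order_vars 0 _ _).2 ⟨k, hk, by simp, rfl⟩, by simpa using hg⟩, rfl⟩

-- ===== VERDICT (by name: the statement is the Claim_ definition above) =====
theorem posterior_indices_spec : Claim_equal_posterior_indices := by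
  unfold Claim_equal_posterior_indices
  intro order_vars given _dom
  unfold Spec_posterior_indices
  rw [alt_eq_piRef]
  simp only [posterior_indices]
  set gp := ((PySem.List.enumerate order_vars 0).filter (fun q => decide (q.2 ∈ given))).map (fun q => q.1) with hgp
  by_cases hempty : gp = []
  · rw [if_pos hempty]
    have hany : order_vars.any (fun v => decide (v ∈ given)) = false := by
      by_contra h
      rw [Bool.not_eq_false] at h
      rcases (any_iff given order_vars).1 h with ⟨m, hm, hg⟩
      have hmem : ((m : Nat) : Int) ∈ gp := by
        rw [hgp]; exact (mem_given_positions order_vars given _).2 ⟨m, hm, rfl, hg⟩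
      rw [hempty] at hmem
      simp at hmem
    rw [piRef_of_not_any given order_vars 0 hany]
  · obtain ⟨last, hlast⟩ : ∃ m, PySem.List.max? gp (fun y => y) = some m := by
      cases h : PySem.List.max? gp (fun y => y) with
      | none => exact absurd ((PySem.List.max?_eq_none_iff _ _).1 h) hempty
      | some m => exact ⟨m, rfl⟩
    rw [if_neg hempty, hlast]
    have hlmax : ∀ y ∈ gp, y ≤ last := PySem.List.max?_isMax hlast
    rcases (mem_given_positions order_vars given last).1 (by rw [← hgp]; exact PySem.List.max?_mem hlast)
      with ⟨lk, hlk, hlast_eq, hlkg⟩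
    -- both sides are strictly increasing lists with the same members
    have hpair1 : ((PySem.List.pyRange 0 (last + 1) 1).filter
        (fun idx => !decide (PySem.List.pyGetD order_vars idx 0 ∈ given))).Pairwise (· < ·) :=
      (PySem.List.pairwise_lt_pyRange_one 0 (last + 1)).filter _
    have hpair2 : (piRef given order_vars 0).Pairwise (· < ·) := piRef_pairwise given order_vars 0
    have hmemiff : ∀ j : Int, j ∈ (PySem.List.pyRange 0 (last + 1) 1).filter
        (fun idx => !decide (PySem.List.pyGetD order_vars idx 0 ∈ given)) ↔ j ∈ piRef given order_vars 0 := by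
      intro j
      rw [List.mem_filter, mem_piRef]
      constructor
      · rintro ⟨hr, hq⟩
        rcases PySem.List.mem_pyRange_one.1 hr with ⟨h0, hlt⟩
        have hjlen : j < (order_vars.length : Int) := by omega
        rw [PySem.List.pyGetD_eq_getElem order_vars 0 h0 hjlen] at hq
        have hng : order_vars.getD j.toNat 0 ∉ given := by
          rw [List.getD_eq_getElem order_vars 0 (by omega)]
          simpa using hq
        have hne : j.toNat ≠ lk := by
          intro h; rw [h] at hng; exact hng hlkg
        refine ⟨j.toNat, by omega, by omega, hng, lk, by omega, hlk, hlkg⟩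
      · rintro ⟨k, hk, rfl, hng, m, hkm, hm, hg⟩
        have hmgp : ((m : Nat) : Int) ∈ gp := by
          rw [hgp]; exact (mem_given_positions order_vars given _).2 ⟨m, hm, rfl, hg⟩
        have hmle : ((m : Nat) : Int) ≤ last := hlmax _ hmgp
        have h0 : (0 : Int) ≤ 0 + (k : Int) := by omega
        refine ⟨PySem.List.mem_pyRange_one.2 ⟨h0, by omega⟩, ?_⟩
        rw [PySem.List.pyGetD_eq_getElem order_vars 0 h0 (by omega)]
        have hidx : (0 + (k : Int)).toNat = k := by omega
        have hng' : order_vars[k]'hk ∉ given := by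
          rw [List.getD_eq_getElem order_vars 0 hk] at hng; exact hng
        simp only [hidx]
        simpa using hng'
    exact List.Perm.eq_of_pairwise (fun a b _ _ => le_antisymm)
      (hpair1.imp le_of_lt) (hpair2.imp le_of_lt)
      ((List.perm_ext_iff_of_nodup
        (hpair1.imp fun h => ne_of_lt h)
        (hpair2.imp fun h => ne_of_lt h)).2 hmemiff)
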